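-- pv_equiv track=rewrite | github.com/qbrilliance/qristal-core | examples/exponential_search/exponential_search_keywords.py | is_in_good_subspace
-- ===== SOURCE A (Python) =====
-- def is_in_good_subspace(s, best_score):
--     val = 0
--     for i in range(len(s)):
--         val += int(s[i]) * 2**(len(s)-1-i)
--     if val > best_score:
--         return 1
--     else:
--         return 0
-- ===== SOURCE B (Python) =====
-- def is_in_good_subspace(s, best_score):
--     val = 0
--     for c in s:
--         val = val * 2 + int(c)
--     if val > best_score:
--         return 1
--     else:
--         return 0
-- ===== Notes on version B (the rewrite author's own statement) =====
-- stated objective: idiomatic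
-- what changed: Replaces the per-index sum of int(s[i]) * 2**(len(s)-1-i) by Horner's scheme: a single accumulator doubled and incremented per character, with no indexing and no independent power computation.
import Mathlib
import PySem

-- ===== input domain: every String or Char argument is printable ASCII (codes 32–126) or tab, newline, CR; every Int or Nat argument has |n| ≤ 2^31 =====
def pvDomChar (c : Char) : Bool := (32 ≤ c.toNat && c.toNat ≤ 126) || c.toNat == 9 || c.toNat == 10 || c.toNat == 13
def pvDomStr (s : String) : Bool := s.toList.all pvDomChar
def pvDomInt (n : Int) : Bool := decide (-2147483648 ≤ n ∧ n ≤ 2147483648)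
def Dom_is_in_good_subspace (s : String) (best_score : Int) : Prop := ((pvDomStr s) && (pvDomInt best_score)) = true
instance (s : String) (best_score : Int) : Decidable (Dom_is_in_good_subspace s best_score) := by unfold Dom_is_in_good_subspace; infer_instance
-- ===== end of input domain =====

-- B replaces A's per-index sum of int(s[i]) * 2**(len(s)-1-i) by Horner's double-and-add accumulator, for idiomatic simplicity.

-- ===== PORT A =====
-- int(s[i]) for a single char is PySem.Int.ofChars? [c]; none (ValueError) is excluded by Pre_, totalised here with getD 0.
def is_in_good_subspace (s : String) (best_score : Int) : Int :=
  let cs := s.toList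
  let n : Int := PySem.Str.len s
  let val := (PySem.List.pyRange 0 n 1).foldl
    (fun val i => val + (PySem.Int.ofChars? [PySem.List.pyGetD cs i ' ']).getD 0 * 2 ^ (n - 1 - i).toNat) 0
  if val > best_score then 1 else 0

-- ===== PORT B =====
def is_in_good_subspace_alt (s : String) (best_score : Int) : Int :=
  let val := s.toList.foldl (fun v c => v * 2 + (PySem.Int.ofChars? [c]).getD 0) 0
  if val > best_score then 1 else 0

-- ===== PRECONDITION & SPEC =====
-- Pre_ excludes exactly the inputs where Python raises ValueError: int(c) fails on any non-digit character.
def Pre_is_in_good_subspace (s : String) (best_score : Int) : Prop :=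
  s.toList.all (fun c => c.isDigit) = true
instance (s : String) (best_score : Int) : Decidable (Pre_is_in_good_subspace s best_score) := by unfold Pre_is_in_good_subspace; infer_instance
def pvWitness_is_in_good_subspace : String × Int := ("101", 4)

def Spec_is_in_good_subspace (s : String) (best_score : Int) (out : Int) : Prop := out = is_in_good_subspace_alt s best_score
instance (s : String) (best_score : Int) (out : Int) : Decidable (Spec_is_in_good_subspace s best_score out) := by unfold Spec_is_in_good_subspace; infer_instance

-- ===== CLAIM (what is proved, stated in full; the proofs are below) =====
def Claim_equal_is_in_good_subspace : Prop := ∀ (s : String) (best_score : Int), Dom_is_in_good_subspace s best_score → Pre_is_in_good_subspace s best_score → Spec_is_in_good_subspace s best_score (is_in_good_subspace s best_score)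

-- ===== LEMMAS AND PROOFS =====

-- A's accumulated value, written as a sum over the index range
def pvSumA (cs : List Char) : Int :=
  ((PySem.List.pyRange 0 (cs.length : Int) 1).map
    (fun i => (PySem.Int.ofChars? [PySem.List.pyGetD cs i ' ']).getD 0 * 2 ^ ((cs.length : Int) - 1 - i).toNat)).sum

lemma pvSumA_snoc (cs : List Char) (c : Char) :
    pvSumA (cs ++ [c]) = 2 * pvSumA cs + (PySem.Int.ofChars? [c]).getD 0 := by
  unfold pvSumA
  have h0 : (0:Int) ≤ (cs.length : Int) := Int.natCast_nonneg _
  have hlen : (((cs ++ [c]).length : Nat) : Int) = (cs.length : Int) + 1 := by simp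
  rw [hlen, PySem.List.pyRange_one_succ_right h0, List.map_append, List.sum_append]
  have hlast : (PySem.Int.ofChars? [PySem.List.pyGetD (cs ++ [c]) ((cs.length : Int)) ' ']).getD 0 *
      2 ^ ((cs.length : Int) + 1 - 1 - (cs.length : Int)).toNat = (PySem.Int.ofChars? [c]).getD 0 := by
    rw [PySem.List.pyGetD_eq_getElem _ _ h0 (by simp)]
    simp
  have hmap : (PySem.List.pyRange 0 (cs.length : Int) 1).map
      (fun i => (PySem.Int.ofChars? [PySem.List.pyGetD (cs ++ [c]) i ' ']).getD 0 * 2 ^ ((cs.length : Int) + 1 - 1 - i).toNat)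
      = (PySem.List.pyRange 0 (cs.length : Int) 1).map
      (fun i => 2 * ((PySem.Int.ofChars? [PySem.List.pyGetD cs i ' ']).getD 0 * 2 ^ ((cs.length : Int) - 1 - i).toNat)) := by
    apply List.map_congr_left
    intro i hi
    obtain ⟨hi0, hi1⟩ := PySem.List.mem_pyRange_one.mp hi
    have hnat : i.toNat < cs.length := by omega
    rw [PySem.List.pyGetD_eq_getElem _ _ hi0 (by simp; omega),
        PySem.List.pyGetD_eq_getElem _ _ hi0 (by exact_mod_cast hi1),
        List.getElem_append_left hnat]
    have he : ((cs.length : Int) + 1 - 1 - i).toNat = ((cs.length : Int) - 1 - i).toNat + 1 := by omega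
    rw [he, pow_succ]
    ring
  rw [hmap, List.sum_map_mul_left]
  simp only [List.map_cons, List.map_nil, List.sum_cons, List.sum_nil, add_zero, hlast]

lemma pvHorner_eq (cs : List Char) :
    cs.foldl (fun v c => v * 2 + (PySem.Int.ofChars? [c]).getD 0) 0 = pvSumA cs := by
  induction cs using List.reverseRecOn with
  | nil => decide
  | append_singleton cs c ih =>
      rw [List.foldl_append, pvSumA_snoc]
      simp [ih]; ring

lemma pvA_eq_B (cs : List Char) :
    (PySem.List.pyRange 0 (cs.length : Int) 1).foldl
      (fun val i => val + (PySem.Int.ofChars? [PySem.List.pyGetD cs i ' ']).getD 0 * 2 ^ ((cs.length : Int) - 1 - i).toNat) 0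
    = cs.foldl (fun v c => v * 2 + (PySem.Int.ofChars? [c]).getD 0) 0 := by
  rw [PySem.List.foldl_add, zero_add, pvHorner_eq]
  rfl

-- ===== VERDICT (by name: the statement is the Claim_ definition above) =====
theorem is_in_good_subspace_spec : Claim_equal_is_in_good_subspace := by
  intro s best_score _ _
  unfold Spec_is_in_good_subspace is_in_good_subspace is_in_good_subspace_alt
  simp only [PySem.Str.len_eq, pvA_eq_B]
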